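-- pv_equiv track=rewrite | github.com/Visterainer/aidea-zotero | addon/scripts/aidea_bridge.py | build_pages_spec
-- ===== SOURCE A (Python) =====
-- def build_pages_spec(page_numbers):
--     pages = sorted(set(int(p) for p in page_numbers if int(p) > 0))
--     if not pages:
--         return ""
--     ranges = []
--     start = pages[0]
--     prev = pages[0]
--     for p in pages[1:]:
--         if p == prev + 1:
--             prev = p
--             continue
--         ranges.append((start, prev))
--         start = p
--         prev = p
--     ranges.append((start, prev))
--     return ",".join(f"{s}-{e}" if s != e else str(s) for s, e in ranges)
-- ===== SOURCE B (Python) =====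
-- def build_pages_spec(page_numbers):
--     pages = {int(p) for p in page_numbers if int(p) > 0}
--     parts = []
--     for s in sorted(p for p in pages if p - 1 not in pages):
--         e = s
--         while e + 1 in pages:
--             e += 1
--         parts.append(str(s) if s == e else f"{s}-{e}")
--     return ",".join(parts)
-- ===== Notes on version B (the rewrite author's own statement) =====
-- stated objective: alternative
-- what changed: Instead of sorting all pages and scanning adjacent elements for breaks, B detects run starts directly by set membership (p-1 not in set), sorts only the run starts, and walks each run forward with 'while e+1 in set' lookups; no adjacency scan, no ranges list, no trailing finalisation append.
import Mathlib
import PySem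

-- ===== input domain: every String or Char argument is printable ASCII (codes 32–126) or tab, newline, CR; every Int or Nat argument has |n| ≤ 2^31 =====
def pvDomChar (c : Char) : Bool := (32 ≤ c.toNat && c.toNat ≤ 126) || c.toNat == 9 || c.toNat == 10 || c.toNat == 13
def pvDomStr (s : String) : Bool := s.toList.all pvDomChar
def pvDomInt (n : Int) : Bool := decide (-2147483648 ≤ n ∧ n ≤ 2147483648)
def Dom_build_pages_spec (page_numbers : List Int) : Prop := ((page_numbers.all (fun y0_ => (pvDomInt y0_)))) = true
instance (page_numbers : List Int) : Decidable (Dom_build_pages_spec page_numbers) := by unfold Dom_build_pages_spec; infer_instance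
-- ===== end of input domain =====

-- B replaces A's sort-everything-and-scan-adjacent loop with set-membership run detection:
-- run starts are the elements s with s-1 not in the set, sorted; each run end is found by
-- walking forward with membership tests (alternative algorithm, same observable result).

-- ===== PORT A =====
-- A's loop state: (ranges, start, prev)
def pvStepA (st : List (Int × Int) × Int × Int) (p : Int) : List (Int × Int) × Int × Int :=
  if p = st.2.2 + 1 then (st.1, st.2.1, p)
  else (st.1 ++ [(st.2.1, st.2.2)], p, p)

def pvFmtA (se : Int × Int) : String :=
  if se.1 ≠ se.2 then PySem.Int.toStr se.1 ++ "-" ++ PySem.Int.toStr se.2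
  else PySem.Int.toStr se.1

def build_pages_spec (page_numbers : List Int) : String :=
  let pages := PySem.List.sorted
    (PySem.Set.ofList (page_numbers.filter (fun p => decide (p > 0)))) (fun x => x) false
  match pages with
  | [] => ""
  | p0 :: tl =>
    let fin := tl.foldl pvStepA ([], p0, p0)
    PySem.Str.join "," ((fin.1 ++ [(fin.2.1, fin.2.2)]).map pvFmtA)

-- ===== PORT B =====
-- B's inner 'while e + 1 in pages: e += 1' loop; terminates because the members above e shrink
def pvWalkEnd (S : List Int) (e : Int) : Int :=
  if (e + 1) ∈ S then pvWalkEnd S (e + 1) else e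
termination_by (S.filter (fun x => decide (e < x))).length
decreasing_by
  rename_i h
  have h1 : S.filter (fun x => decide (e + 1 < x))
      = (S.filter (fun x => decide (e < x))).filter (fun x => decide (e + 1 < x)) := by
    rw [List.filter_filter]
    exact (List.filter_congr (fun x _ => by
      by_cases hx : e + 1 < x
      · simp [hx, show e < x by omega]
      · simp [hx])).symm
  rw [h1]
  refine List.length_filter_lt_length_iff_exists.mpr ⟨e + 1, ?_, by simp⟩
  simp [List.mem_filter, h]

-- string piece for the run [s, e]
def pvPiece (S : List Int) (s : Int) : String :=
  let e := pvWalkEnd S s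
  if s = e then PySem.Int.toStr s else PySem.Int.toStr s ++ "-" ++ PySem.Int.toStr e

def build_pages_spec_alt (page_numbers : List Int) : String :=
  let pages := PySem.Set.ofList (page_numbers.filter (fun p => decide (p > 0)))
  let starts := PySem.List.sorted
    (pages.filter (fun p => !decide ((p - 1) ∈ pages))) (fun x => x) false
  PySem.Str.join "," (starts.map (pvPiece pages))

-- ===== PRECONDITION & SPEC =====
def Spec_build_pages_spec (page_numbers : List Int) (out : String) : Prop := out = build_pages_spec_alt page_numbers
instance (page_numbers : List Int) (out : String) : Decidable (Spec_build_pages_spec page_numbers out) := by unfold Spec_build_pages_spec; infer_instance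

-- ===== CLAIM (what is proved, stated in full; the proofs are below) =====
def Claim_equal_build_pages_spec : Prop := ∀ (page_numbers : List Int), Dom_build_pages_spec page_numbers → Spec_build_pages_spec page_numbers (build_pages_spec page_numbers)

-- ===== LEMMAS AND PROOFS =====

-- reference decomposition (proof-side only): maximal consecutive runs of a sorted list
def pvExtend (e : Int) : List Int → Int × List Int
  | [] => (e, [])
  | x :: xs => if x = e + 1 then pvExtend x xs else (e, x :: xs)

theorem pvExtend_len : ∀ (xs : List Int) (e : Int), (pvExtend e xs).2.length ≤ xs.length
  | [], _ => Nat.le_refl _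
  | x :: xs, e => by
    simp only [pvExtend]
    split
    · exact Nat.le_succ_of_le (pvExtend_len xs x)
    · exact Nat.le_refl _

def pvRuns : List Int → List String
  | [] => []
  | s :: rest =>
    let r := pvExtend s rest
    (if s = r.1 then PySem.Int.toStr s
     else PySem.Int.toStr s ++ "-" ++ PySem.Int.toStr r.1) :: pvRuns r.2
termination_by l => l.length
decreasing_by exact Nat.lt_succ_of_le (pvExtend_len rest s)

theorem pvFmt_eq (s p : Int) :
    pvFmtA (s, p) = (if s = p then PySem.Int.toStr s
      else PySem.Int.toStr s ++ "-" ++ PySem.Int.toStr p) := by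
  by_cases h : s = p <;> simp [pvFmtA, h]

-- A's fold, after finalisation, emits exactly the runs decomposition
theorem pvLoop_eq : ∀ (rest : List Int) (ranges : List (Int × Int)) (start prev : Int),
    ((rest.foldl pvStepA (ranges, start, prev)).1 ++
      [((rest.foldl pvStepA (ranges, start, prev)).2.1,
        (rest.foldl pvStepA (ranges, start, prev)).2.2)]).map pvFmtA
    = ranges.map pvFmtA ++
      ((if start = (pvExtend prev rest).1 then PySem.Int.toStr start
        else PySem.Int.toStr start ++ "-" ++ PySem.Int.toStr (pvExtend prev rest).1)
        :: pvRuns (pvExtend prev rest).2) := by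
  intro rest
  induction rest with
  | nil =>
    intro ranges start prev
    simp [pvExtend, pvRuns, pvFmt_eq]
  | cons x xs ih =>
    intro ranges start prev
    by_cases h : x = prev + 1
    · subst h
      simp only [List.foldl_cons, pvStepA, pvExtend, ite_true]
      exact ih ranges start (prev + 1)
    · simp only [List.foldl_cons, pvStepA, pvExtend, if_neg h]
      rw [ih (ranges ++ [(start, prev)]) x x]
      rw [pvRuns]
      simp [pvFmt_eq]

theorem pvExtend_sublist : ∀ (xs : List Int) (e : Int), (pvExtend e xs).2.Sublist xs
  | [], _ => List.Sublist.refl _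
  | x :: xs, e => by
    simp only [pvExtend]
    split
    · exact (pvExtend_sublist xs x).trans (List.sublist_cons_self _ _)
    · exact List.Sublist.refl _

-- grand invariant along one run: walking S from p reaches the run end that pvExtend finds,
-- the remainder agrees on the start-filter, and S above the run end is exactly the remainder
theorem pvGrand (S : List Int) : ∀ (rest : List Int) (a p lo : Int),
    ((p :: rest).Pairwise (· < ·)) → a ≤ p → lo < a →
    (∀ v : Int, lo < v → (v ∈ S ↔ (a ≤ v ∧ v ≤ p) ∨ v ∈ rest)) →
    pvWalkEnd S p = (pvExtend p rest).1 ∧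
    rest.filter (fun q => !decide ((q - 1) ∈ S))
      = (pvExtend p rest).2.filter (fun q => !decide ((q - 1) ∈ S)) ∧
    (∀ v : Int, (pvExtend p rest).1 < v → (v ∈ S ↔ v ∈ (pvExtend p rest).2)) ∧
    (∀ y ∈ (pvExtend p rest).2, (pvExtend p rest).1 + 1 < y) := by
  intro rest
  induction rest with
  | nil =>
    intro a p lo hp hap hloa H
    have hnot : (p + 1) ∉ S := by
      intro hmem
      rcases (H (p + 1) (by omega)).mp hmem with ⟨_, h2⟩ | h
      · omega
      · simp at h
    refine ⟨?_, rfl, ?_, by simp [pvExtend]⟩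
    · rw [pvWalkEnd]
      simp [pvExtend, hnot]
    · intro v hv
      simp only [pvExtend] at hv ⊢
      constructor
      · intro hmem
        rcases (H v (by omega)).mp hmem with ⟨_, h2⟩ | h
        · omega
        · exact h
      · intro h; simp at h
  | cons x xs ih =>
    intro a p lo hp hap hloa H
    by_cases hx : x = p + 1
    · subst hx
      have hp' : ((p + 1) :: xs).Pairwise (· < ·) := hp.tail
      have H' : ∀ v : Int, lo < v → (v ∈ S ↔ (a ≤ v ∧ v ≤ p + 1) ∨ v ∈ xs) := by
        intro v hv
        rw [H v hv]
        constructor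
        · rintro (⟨h1, h2⟩ | h)
          · exact Or.inl ⟨h1, by omega⟩
          · rcases List.mem_cons.mp h with h | h
            · exact Or.inl ⟨by omega, by omega⟩
            · exact Or.inr h
        · rintro (⟨h1, h2⟩ | h)
          · by_cases hvp : v ≤ p
            · exact Or.inl ⟨h1, hvp⟩
            · have : v = p + 1 := by omega
              exact Or.inr (List.mem_cons.mpr (Or.inl this))
          · exact Or.inr (List.mem_cons.mpr (Or.inr h))
      obtain ⟨ih1, ih2, ih3, ih4⟩ := ih a (p + 1) lo hp' (by omega) hloa H'
      have hmem : (p + 1) ∈ S := (H (p + 1) (by omega)).mpr (Or.inr (by simp))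
      have hpe : pvExtend p ((p + 1) :: xs) = pvExtend (p + 1) xs := by
        simp [pvExtend]
      refine ⟨?_, ?_, by rw [hpe]; exact ih3, by rw [hpe]; exact ih4⟩
      · rw [pvWalkEnd, if_pos hmem, hpe]; exact ih1
      · rw [hpe]
        have hpredfalse : (!decide ((p + 1 - 1) ∈ S)) = false := by
          have : p ∈ S := (H p (by omega)).mpr (Or.inl ⟨hap, le_refl p⟩)
          simp only [show p + 1 - 1 = p by omega]
          simp [this]
        rw [List.filter_cons, hpredfalse]
        simpa using ih2
    · have hxp : p < x := (List.pairwise_cons.mp hp).1 x (by simp)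
      have hxs : ∀ y ∈ xs, x < y := (List.pairwise_cons.mp hp.tail).1
      have hpe : pvExtend p (x :: xs) = (p, x :: xs) := by
        simp [pvExtend, hx]
      have hnot : (p + 1) ∉ S := by
        intro hmem
        rcases (H (p + 1) (by omega)).mp hmem with ⟨_, h2⟩ | h
        · omega
        · rcases List.mem_cons.mp h with h | h
          · omega
          · have := hxs _ h; omega
      refine ⟨?_, by rw [hpe], ?_, ?_⟩
      · rw [pvWalkEnd, if_neg hnot, hpe]
      · intro v hv
        rw [hpe] at hv
        have hv' : p < v := hv
        rw [hpe]
        rw [H v (by omega)]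
        constructor
        · rintro (⟨_, h2⟩ | h)
          · omega
          · exact h
        · exact Or.inr
      · rw [hpe]
        intro y hy
        rcases List.mem_cons.mp hy with h | h
        · omega
        · have := hxs _ h; omega

-- the runs of a strictly sorted list Q whose strict-upper part of S is exactly Q
theorem pvRuns_eq (S : List Int) (Q : List Int) (lo : Int)
    (hp : Q.Pairwise (· < ·)) (hlo : ∀ y ∈ Q, lo + 1 < y)
    (H : ∀ v : Int, lo < v → (v ∈ S ↔ v ∈ Q)) :
    pvRuns Q = (Q.filter (fun q => !decide ((q - 1) ∈ S))).map (pvPiece S) := by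
  match Q, hp, hlo, H with
  | [], _, _, _ => simp [pvRuns]
  | p :: rest, hp, hlo, H =>
    have hset : ∀ v : Int, lo < v → (v ∈ S ↔ (p ≤ v ∧ v ≤ p) ∨ v ∈ rest) := by
      intro v hv
      rw [H v hv]
      simp only [List.mem_cons]
      constructor
      · rintro (h | h)
        · exact Or.inl ⟨le_of_eq h.symm, le_of_eq h⟩
        · exact Or.inr h
      · rintro (⟨h1, h2⟩ | h)
        · exact Or.inl (by omega)
        · exact Or.inr h
    have hlop : lo < p := by have := hlo p (by simp); omega
    obtain ⟨g1, g2, g3, g4⟩ := pvGrand S rest p p lo hp (le_refl p) hlop hset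
    have hrest_gt : ∀ y ∈ rest, p < y := (List.pairwise_cons.mp hp).1
    have hpred_p : (!decide ((p - 1) ∈ S)) = true := by
      have : (p - 1) ∉ S := by
        intro hmem
        rcases (hset (p - 1) (by have := hlo p (by simp); omega)).mp hmem with ⟨h1, _⟩ | h
        · omega
        · have := hrest_gt _ h; omega
      simp [this]
    have hsub : (pvExtend p rest).2.Sublist rest := pvExtend_sublist rest p
    have hrec := pvRuns_eq S (pvExtend p rest).2 (pvExtend p rest).1
      (hp.tail.sublist hsub) g4 g3
    rw [pvRuns, List.filter_cons, hpred_p, if_pos rfl, g2, List.map_cons, ← hrec]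
    congr 1
    simp only [pvPiece, ← g1]
termination_by Q.length
decreasing_by simpa using Nat.lt_succ_of_le (pvExtend_sublist rest p).length_le

-- A's port equals the runs decomposition of any page list P
theorem pvA_runs (P : List Int) :
    (match P with
      | [] => ""
      | p0 :: tl =>
        let fin := tl.foldl pvStepA ([], p0, p0)
        PySem.Str.join "," ((fin.1 ++ [(fin.2.1, fin.2.2)]).map pvFmtA))
      = PySem.Str.join "," (pvRuns P) := by
  cases P with
  | nil => simp [pvRuns, PySem.Str.join]
  | cons p0 tl =>
    simp only []
    rw [pvLoop_eq tl [] p0 p0, pvRuns]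
    simp

-- the two ports agree
theorem build_pages_spec_spec' (page_numbers : List Int) :
    build_pages_spec page_numbers = build_pages_spec_alt page_numbers := by
  have hA : build_pages_spec page_numbers
      = PySem.Str.join "," (pvRuns (PySem.List.sorted
          (PySem.Set.ofList (page_numbers.filter (fun p => decide (p > 0)))) (fun x => x) false)) :=
    pvA_runs _
  rw [hA]
  show _ = PySem.Str.join "," ((PySem.List.sorted
      ((PySem.Set.ofList (page_numbers.filter (fun p => decide (p > 0)))).filter
        (fun p => !decide ((p - 1) ∈ PySem.Set.ofList (page_numbers.filter (fun p => decide (p > 0))))))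
      (fun x => x) false).map
      (pvPiece (PySem.Set.ofList (page_numbers.filter (fun p => decide (p > 0))))))
  set S := PySem.Set.ofList (page_numbers.filter (fun p => decide (p > 0))) with hS
  set P := PySem.List.sorted S (fun x => x) false with hPdef
  have hPpair : P.Pairwise (· < ·) := by rw [hPdef, hS]; exact PySem.List.sorted_ofList_pairwise_lt _
  have hperm : P.Perm S := PySem.List.sorted_perm _ _ _
  have hstarts : PySem.List.sorted (S.filter (fun p => !decide ((p - 1) ∈ S))) (fun x => x) false
      = P.filter (fun p => !decide ((p - 1) ∈ S)) := by
    apply PySem.List.sorted_eq_of_perm_of_pairwise_lt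
    · exact hperm.filter _
    · exact List.Pairwise.filter _ hPpair
  rw [hstarts]
  cases hP : P with
  | nil => simp [pvRuns]
  | cons h t =>
    have hmem : ∀ v : Int, (h - 2) < v → (v ∈ S ↔ v ∈ P) := by
      intro v _
      exact ⟨fun hv => hperm.mem_iff.mpr hv, fun hv => hperm.mem_iff.mp hv⟩
    have hlo : ∀ y ∈ P, (h - 2) + 1 < y := by
      intro y hy
      rw [hP] at hy
      rcases List.mem_cons.mp hy with hy | hy
      · omega
      · have : h < y := by
          rw [hP] at hPpair
          exact (List.pairwise_cons.mp hPpair).1 y hy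
        omega
    rw [← hP]
    rw [pvRuns_eq S P (h - 2) hPpair hlo hmem]

-- ===== VERDICT (by name: the statement is the Claim_ definition above) =====
theorem build_pages_spec_spec : Claim_equal_build_pages_spec := by
  intro pn _
  exact build_pages_spec_spec' pn
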